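-- pv_equiv track=rewrite | github.com/nkws/sg-car-ownership | collectors/hdb_carpark.py | _match_town
-- ===== SOURCE A (Python) =====
-- CARPARK_PREFIX_TOWN = {
--     "A": "Ang Mo Kio", "ACB": "Ang Mo Kio", "ACM": "Ang Mo Kio", "AK": "Ang Mo Kio",
--     "AM": "Ang Mo Kio",
--     "B": "Bukit Merah", "BB": "Bukit Batok", "BBM": "Bukit Batok",
--     "BJ": "Bukit Panjang", "BN": "Bedok",
--     "BR": "Bedok", "BRB": "Bedok",
--     "C": "Clementi", "CK": "Choa Chu Kang", "CKM": "Choa Chu Kang",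
--     "CR": "Central",
--     "CT": "Clementi",
--     "D": "Bukit Merah",
--     "E": "Pasir Ris",
--     "FR": "Bukit Merah",
--     "G": "Geylang",
--     "GSM": "Geylang",
--     "H": "Toa Payoh", "HE": "Hougang", "HG": "Hougang",
--     "HLM": "Kallang/Whampoa",
--     "J": "Jurong East", "JE": "Jurong East", "JW": "Jurong West",
--     "K": "Kallang/Whampoa", "KE": "Kallang/Whampoa",
--     "MP": "Marine Parade",
--     "N": "Sembawang",
--     "P": "Pasir Ris", "PE": "Pasir Ris", "PP": "Punggol",
--     "Q": "Queenstown",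
--     "RHM": "Toa Payoh",
--     "S": "Serangoon", "SE": "Sengkang", "SK": "Sengkang",
--     "SB": "Sembawang", "SBM": "Sembawang",
--     "T": "Tampines", "TM": "Tampines", "TP": "Toa Payoh",
--     "W": "Woodlands", "WL": "Woodlands",
--     "Y": "Yishun", "YS": "Yishun",
-- }
--
-- def _match_town(carpark_no):
--     """Match a carpark number to a town using prefix patterns."""
--     if not carpark_no:
--         return "Unknown"
--
--     # Try longest prefix match first
--     for length in range(min(len(carpark_no), 4), 0, -1):
--         prefix = carpark_no[:length]
--         if prefix in CARPARK_PREFIX_TOWN: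
--             return CARPARK_PREFIX_TOWN[prefix]
--
--     return "Unknown"
-- ===== SOURCE B (Python) =====
-- # Prefix tables grouped by prefix length (all keys are 1-3 chars long);
-- # walk the carpark number one character at a time, growing the prefix,
-- # so the last (= longest) table hit wins.
-- _TOWNS_BY_LEN = [
--     {  # length-1 prefixes
--         "A": "Ang Mo Kio", "B": "Bukit Merah", "C": "Clementi", "D": "Bukit Merah",
--         "E": "Pasir Ris", "G": "Geylang", "H": "Toa Payoh", "J": "Jurong East",
--         "K": "Kallang/Whampoa", "N": "Sembawang", "P": "Pasir Ris", "Q": "Queenstown",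
--         "S": "Serangoon", "T": "Tampines", "W": "Woodlands", "Y": "Yishun",
--     },
--     {  # length-2 prefixes
--         "AK": "Ang Mo Kio", "AM": "Ang Mo Kio", "BB": "Bukit Batok",
--         "BJ": "Bukit Panjang", "BN": "Bedok", "BR": "Bedok", "CK": "Choa Chu Kang",
--         "CR": "Central", "CT": "Clementi", "FR": "Bukit Merah", "HE": "Hougang",
--         "HG": "Hougang", "JE": "Jurong East", "JW": "Jurong West",
--         "KE": "Kallang/Whampoa", "MP": "Marine Parade", "PE": "Pasir Ris",
--         "PP": "Punggol", "SE": "Sengkang", "SK": "Sengkang", "SB": "Sembawang",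
--         "TM": "Tampines", "TP": "Toa Payoh", "WL": "Woodlands", "YS": "Yishun",
--     },
--     {  # length-3 prefixes
--         "ACB": "Ang Mo Kio", "ACM": "Ang Mo Kio", "BBM": "Bukit Batok",
--         "BRB": "Bedok", "CKM": "Choa Chu Kang", "GSM": "Geylang",
--         "HLM": "Kallang/Whampoa", "RHM": "Toa Payoh", "SBM": "Sembawang",
--     },
-- ]
--
-- def _match_town(carpark_no):
--     """Match a carpark number to a town: the longest matching prefix wins."""
--     if not carpark_no:
--         return "Unknown"
--     town = "Unknown"
--     prefix = ""
--     for ch, table in zip(carpark_no, _TOWNS_BY_LEN):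
--         prefix += ch
--         town = table.get(prefix, town)
--     return town
-- ===== Notes on version B (the rewrite author's own statement) =====
-- stated objective: alternative
-- what changed: B regroups the flat prefix->town dict into per-length tables and walks the carpark number character by character, growing the prefix and letting the last (longest) table hit win, instead of A's descending slice-lookup loop with early return.
import Mathlib
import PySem

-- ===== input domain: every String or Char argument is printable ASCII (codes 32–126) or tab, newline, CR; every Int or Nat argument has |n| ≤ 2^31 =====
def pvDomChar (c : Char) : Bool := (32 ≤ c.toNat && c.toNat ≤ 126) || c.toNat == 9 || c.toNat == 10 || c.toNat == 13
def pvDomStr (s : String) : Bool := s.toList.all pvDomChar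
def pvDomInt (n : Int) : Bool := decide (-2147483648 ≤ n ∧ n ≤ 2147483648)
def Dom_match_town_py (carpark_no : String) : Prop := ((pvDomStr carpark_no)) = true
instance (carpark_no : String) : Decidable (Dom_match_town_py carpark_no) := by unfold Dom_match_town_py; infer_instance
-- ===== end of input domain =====

-- B regroups the prefix table by prefix length and walks the string one character at a
-- time, growing the prefix with the last (longest) hit winning; A slices descending
-- prefix lengths with early return. Alternative decomposition, same cost.
-- Python str keys are ported as their character lists (Python str equality is
-- code-point equality, as is List Char equality).

-- ===== PORT A =====
def pvTowns : PySem.Dict (List Char) String := PySem.Dict.mk [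
  (['A'], "Ang Mo Kio"), (['A','C','B'], "Ang Mo Kio"), (['A','C','M'], "Ang Mo Kio"),
  (['A','K'], "Ang Mo Kio"), (['A','M'], "Ang Mo Kio"),
  (['B'], "Bukit Merah"), (['B','B'], "Bukit Batok"), (['B','B','M'], "Bukit Batok"),
  (['B','J'], "Bukit Panjang"), (['B','N'], "Bedok"),
  (['B','R'], "Bedok"), (['B','R','B'], "Bedok"),
  (['C'], "Clementi"), (['C','K'], "Choa Chu Kang"), (['C','K','M'], "Choa Chu Kang"),
  (['C','R'], "Central"), (['C','T'], "Clementi"),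
  (['D'], "Bukit Merah"), (['E'], "Pasir Ris"), (['F','R'], "Bukit Merah"),
  (['G'], "Geylang"), (['G','S','M'], "Geylang"),
  (['H'], "Toa Payoh"), (['H','E'], "Hougang"), (['H','G'], "Hougang"),
  (['H','L','M'], "Kallang/Whampoa"),
  (['J'], "Jurong East"), (['J','E'], "Jurong East"), (['J','W'], "Jurong West"),
  (['K'], "Kallang/Whampoa"), (['K','E'], "Kallang/Whampoa"),
  (['M','P'], "Marine Parade"), (['N'], "Sembawang"),
  (['P'], "Pasir Ris"), (['P','E'], "Pasir Ris"), (['P','P'], "Punggol"),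
  (['Q'], "Queenstown"), (['R','H','M'], "Toa Payoh"),
  (['S'], "Serangoon"), (['S','E'], "Sengkang"), (['S','K'], "Sengkang"),
  (['S','B'], "Sembawang"), (['S','B','M'], "Sembawang"),
  (['T'], "Tampines"), (['T','M'], "Tampines"), (['T','P'], "Toa Payoh"),
  (['W'], "Woodlands"), (['W','L'], "Woodlands"),
  (['Y'], "Yishun"), (['Y','S'], "Yishun")]

-- A's loop: 'for length in range(min(len,4), 0, -1): if prefix in d: return d[prefix]'
def pvALoop (cs : List Char) : List Int → String
  | [] => "Unknown"
  | l :: rest =>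
      match pvTowns.get? (PySem.List.slice cs none (some l)) with
      | some t => t
      | none => pvALoop cs rest

def match_town_py (carpark_no : String) : String :=
  if carpark_no.toList = [] then "Unknown"     -- 'if not carpark_no'
  else pvALoop carpark_no.toList (PySem.List.pyRange (min (PySem.Str.len carpark_no) 4) 0 (-1))

-- ===== PORT B =====
-- B's per-length tables (keys written as "…".toList = the Python str key's code points)
def pvByLen1 : PySem.Dict (List Char) String := PySem.Dict.mk [
  ("A".toList, "Ang Mo Kio"), ("B".toList, "Bukit Merah"), ("C".toList, "Clementi"),
  ("D".toList, "Bukit Merah"), ("E".toList, "Pasir Ris"), ("G".toList, "Geylang"),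
  ("H".toList, "Toa Payoh"), ("J".toList, "Jurong East"), ("K".toList, "Kallang/Whampoa"),
  ("N".toList, "Sembawang"), ("P".toList, "Pasir Ris"), ("Q".toList, "Queenstown"),
  ("S".toList, "Serangoon"), ("T".toList, "Tampines"), ("W".toList, "Woodlands"),
  ("Y".toList, "Yishun")]

def pvByLen2 : PySem.Dict (List Char) String := PySem.Dict.mk [
  ("AK".toList, "Ang Mo Kio"), ("AM".toList, "Ang Mo Kio"), ("BB".toList, "Bukit Batok"),
  ("BJ".toList, "Bukit Panjang"), ("BN".toList, "Bedok"), ("BR".toList, "Bedok"),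
  ("CK".toList, "Choa Chu Kang"), ("CR".toList, "Central"), ("CT".toList, "Clementi"),
  ("FR".toList, "Bukit Merah"), ("HE".toList, "Hougang"), ("HG".toList, "Hougang"),
  ("JE".toList, "Jurong East"), ("JW".toList, "Jurong West"), ("KE".toList, "Kallang/Whampoa"),
  ("MP".toList, "Marine Parade"), ("PE".toList, "Pasir Ris"), ("PP".toList, "Punggol"),
  ("SE".toList, "Sengkang"), ("SK".toList, "Sengkang"), ("SB".toList, "Sembawang"),
  ("TM".toList, "Tampines"), ("TP".toList, "Toa Payoh"), ("WL".toList, "Woodlands"),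
  ("YS".toList, "Yishun")]

def pvByLen3 : PySem.Dict (List Char) String := PySem.Dict.mk [
  ("ACB".toList, "Ang Mo Kio"), ("ACM".toList, "Ang Mo Kio"), ("BBM".toList, "Bukit Batok"),
  ("BRB".toList, "Bedok"), ("CKM".toList, "Choa Chu Kang"), ("GSM".toList, "Geylang"),
  ("HLM".toList, "Kallang/Whampoa"), ("RHM".toList, "Toa Payoh"), ("SBM".toList, "Sembawang")]

def pvTownsByLen : List (PySem.Dict (List Char) String) := [pvByLen1, pvByLen2, pvByLen3]

-- B's loop: 'for ch, table in zip(carpark_no, _TOWNS_BY_LEN): prefix += ch; town = table.get(prefix, town)'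
def pvBLoop : List (Char × PySem.Dict (List Char) String) → List Char → String → String
  | [], _, town => town
  | (ch, table) :: rest, pre, town =>
      pvBLoop rest (pre ++ [ch]) (table.getD (pre ++ [ch]) town)

def match_town_py_alt (carpark_no : String) : String :=
  if carpark_no.toList = [] then "Unknown"     -- 'if not carpark_no'
  else pvBLoop (carpark_no.toList.zip pvTownsByLen) [] "Unknown"

-- ===== PRECONDITION & SPEC =====
def Spec_match_town_py (carpark_no : String) (out : String) : Prop := out = match_town_py_alt carpark_no
instance (carpark_no : String) (out : String) : Decidable (Spec_match_town_py carpark_no out) := by unfold Spec_match_town_py; infer_instance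

-- ===== CLAIM (what is proved, stated in full; the proofs are below) =====
def Claim_equal_match_town_py : Prop := ∀ (carpark_no : String), Dom_match_town_py carpark_no → Spec_match_town_py carpark_no (match_town_py carpark_no)

-- ===== LEMMAS AND PROOFS =====

-- the flat dict agrees with the per-length table on keys of that length
-- (keys of every other length fail the structural list comparison)
theorem pv_get1 (a : Char) : pvTowns.get? [a] = pvByLen1.get? [a] := by
  simp [pvTowns, pvByLen1, PySem.Dict.get?_mk_cons]

theorem pv_get2 (a b : Char) : pvTowns.get? [a, b] = pvByLen2.get? [a, b] := by
  simp [pvTowns, pvByLen2, PySem.Dict.get?_mk_cons]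

theorem pv_get3 (a b c : Char) : pvTowns.get? [a, b, c] = pvByLen3.get? [a, b, c] := by
  simp [pvTowns, pvByLen3, PySem.Dict.get?_mk_cons]

-- no key has length 4
theorem pv_get4 (a b c d : Char) : pvTowns.get? [a, b, c, d] = none := by
  simp [pvTowns, PySem.Dict.get?]

-- on a nonempty char list both loops agree (case split on length 1, 2, 3, ≥ 4;
-- both unfold to the same nested matches on the per-length lookups)
theorem pv_loops_eq (cs : List Char) (h : cs ≠ []) :
    pvALoop cs (PySem.List.pyRange (min (cs.length : Int) 4) 0 (-1)) =
      pvBLoop (cs.zip pvTownsByLen) [] "Unknown" := by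
  match cs with
  | [] => exact absurd rfl h
  | [a] =>
      simp [pvALoop, pvBLoop, pvTownsByLen, PySem.List.pyRange, List.range_succ, PySem.List.slice,
            pv_get1, PySem.Dict.getD_eq_get?_getD]
      cases pvByLen1.get? [a] <;> simp
  | [a, b] =>
      simp [pvALoop, pvBLoop, pvTownsByLen, PySem.List.pyRange, List.range_succ, PySem.List.slice,
            pv_get1, pv_get2, PySem.Dict.getD_eq_get?_getD]
      cases pvByLen2.get? [a, b] <;> cases pvByLen1.get? [a] <;> simp
  | [a, b, c] =>
      simp [pvALoop, pvBLoop, pvTownsByLen, PySem.List.pyRange, List.range_succ, PySem.List.slice,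
            pv_get1, pv_get2, pv_get3, PySem.Dict.getD_eq_get?_getD]
      cases pvByLen3.get? [a, b, c] <;> cases pvByLen2.get? [a, b] <;>
        cases pvByLen1.get? [a] <;> simp
  | a :: b :: c :: d :: t =>
      have hm : min ((a :: b :: c :: d :: t).length : Int) 4 = 4 := by
        simp only [List.length_cons]; omega
      rw [hm]
      simp [pvALoop, pvBLoop, pvTownsByLen, PySem.List.pyRange, List.range_succ, PySem.List.slice,
            pv_get1, pv_get2, pv_get3, pv_get4, PySem.Dict.getD_eq_get?_getD]
      cases pvByLen3.get? [a, b, c] <;> cases pvByLen2.get? [a, b] <;>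
        cases pvByLen1.get? [a] <;> simp

-- ===== VERDICT (by name: the statement is the Claim_ definition above) =====
theorem match_town_py_spec : Claim_equal_match_town_py := by
  intro s _
  unfold Spec_match_town_py match_town_py match_town_py_alt
  by_cases h : s.toList = []
  · simp [h]
  · simp only [h, if_false]
    rw [PySem.Str.len_eq]
    exact pv_loops_eq s.toList h
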